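-- pv_equiv track=rewrite | github.com/phongdz-cloud/Python | Lesson9/Bai5.py | solution
-- ===== SOURCE A (Python) =====
-- def checkValid(a,b):
--     return a * b < 0
--
-- def solution(lstA):
--     lstB =[]
--     if len(lstA) > 1:
--         if checkValid(lstA[0],lstA[1]):
--             lstB.append(lstA[0])
--         for i in range(1,len(lstA)-1):
--             if checkValid(lstA[i],lstA[i-1]) or checkValid(lstA[i], lstA[i + 1]):
--                 lstB.append(lstA[i])
--         if checkValid(lstA[len(lstA)-1], lstA[len(lstA)-2]):
--             lstB.append(lstA[len(lstA)-1])
--     return lstB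
-- ===== SOURCE B (Python) =====
-- def solution(lstA):
--     n = len(lstA)
--     boundary = set()
--     for i in range(n - 1):
--         if lstA[i] * lstA[i + 1] < 0:
--             boundary.add(i)
--             boundary.add(i + 1)
--     return [lstA[j] for j in range(n) if j in boundary]
-- ===== Notes on version B (the rewrite author's own statement) =====
-- stated objective: simpler
-- what changed: Replaces A's three special-cased two-sided neighbor checks (first element, middle loop, last element) with one boundary-marking pass over adjacent pairs into an index set followed by an ascending order-preserving filter.
import Mathlib
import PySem

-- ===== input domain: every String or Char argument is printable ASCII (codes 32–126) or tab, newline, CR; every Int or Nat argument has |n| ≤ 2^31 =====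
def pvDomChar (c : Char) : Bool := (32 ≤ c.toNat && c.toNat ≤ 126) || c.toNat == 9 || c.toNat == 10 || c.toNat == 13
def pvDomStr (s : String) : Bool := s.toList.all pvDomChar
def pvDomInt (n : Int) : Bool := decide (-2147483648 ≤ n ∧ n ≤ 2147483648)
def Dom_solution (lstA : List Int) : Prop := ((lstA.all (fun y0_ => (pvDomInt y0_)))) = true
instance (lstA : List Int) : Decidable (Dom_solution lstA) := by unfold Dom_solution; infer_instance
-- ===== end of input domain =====

-- B replaces A's first/middle/last special-cased two-sided neighbor checks by one
-- boundary-marking pass over adjacent pairs plus an ascending index filter (objective: simpler).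

-- ===== PORT A =====
def checkValid (a b : Int) : Bool := decide (a * b < 0)

-- every index A reads is in range when len > 1, so pyGetD's default 0 is never read
def solution (lstA : List Int) : List Int :=
  let lstB : List Int := []
  if 1 < (lstA.length : Int) then
    let lstB := if checkValid (PySem.List.pyGetD lstA 0 0) (PySem.List.pyGetD lstA 1 0)
                then lstB ++ [PySem.List.pyGetD lstA 0 0] else lstB
    let lstB := (PySem.List.pyRange 1 ((lstA.length : Int) - 1) 1).foldl
      (fun acc i =>
        if checkValid (PySem.List.pyGetD lstA i 0) (PySem.List.pyGetD lstA (i - 1) 0) ||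
           checkValid (PySem.List.pyGetD lstA i 0) (PySem.List.pyGetD lstA (i + 1) 0)
        then acc ++ [PySem.List.pyGetD lstA i 0] else acc) lstB
    let lstB := if checkValid (PySem.List.pyGetD lstA ((lstA.length : Int) - 1) 0)
                              (PySem.List.pyGetD lstA ((lstA.length : Int) - 2) 0)
                then lstB ++ [PySem.List.pyGetD lstA ((lstA.length : Int) - 1) 0] else lstB
    lstB
  else lstB

-- ===== PORT B =====
def solution_alt (lstA : List Int) : List Int :=
  let n : Int := lstA.length
  let boundary : PySem.Set Int :=
    (PySem.List.pyRange 0 (n - 1) 1).foldl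
      (fun s i =>
        if PySem.List.pyGetD lstA i 0 * PySem.List.pyGetD lstA (i + 1) 0 < 0
        then PySem.Set.add (PySem.Set.add s i) (i + 1) else s)
      PySem.Set.empty
  (PySem.List.pyRange 0 n 1).foldl
    (fun acc j => if boundary.contains j then acc ++ [PySem.List.pyGetD lstA j 0] else acc) []

-- ===== PRECONDITION & SPEC =====
def Spec_solution (lstA : List Int) (out : List Int) : Prop := out = solution_alt lstA
instance (lstA : List Int) (out : List Int) : Decidable (Spec_solution lstA out) := by unfold Spec_solution; infer_instance

-- ===== CLAIM (what is proved, stated in full; the proofs are below) =====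
def Claim_equal_solution : Prop := ∀ (lstA : List Int), Dom_solution lstA → Spec_solution lstA (solution lstA)

-- ===== LEMMAS AND PROOFS =====

-- Boolean "index j is adjacent to a sign change" predicate; both programs filter by it
def pvPb (xs : List Int) (j : Int) : Bool :=
  (decide (0 ≤ j) && decide (j < (xs.length : Int) - 1) &&
     decide (PySem.List.pyGetD xs j 0 * PySem.List.pyGetD xs (j + 1) 0 < 0)) ||
  (decide (1 ≤ j) && decide (j < (xs.length : Int)) &&
     decide (PySem.List.pyGetD xs (j - 1) 0 * PySem.List.pyGetD xs j 0 < 0))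

-- common canonical form: filter ascending indices by pvPb
def pvPick (xs : List Int) : List Int :=
  (PySem.List.pyRange 0 (xs.length : Int) 1).foldl
    (fun acc j => if pvPb xs j then acc ++ [PySem.List.pyGetD xs j 0] else acc) []

theorem pv_mem_mark (xs : List Int) (l : List Int) (s : PySem.Set Int) (j : Int) :
    j ∈ l.foldl
      (fun s i =>
        if PySem.List.pyGetD xs i 0 * PySem.List.pyGetD xs (i + 1) 0 < 0
        then PySem.Set.add (PySem.Set.add s i) (i + 1) else s) s ↔
    j ∈ s ∨ ∃ i ∈ l, PySem.List.pyGetD xs i 0 * PySem.List.pyGetD xs (i + 1) 0 < 0 ∧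
      (j = i ∨ j = i + 1) := by
  induction l generalizing s with
  | nil => simp
  | cons a t ih =>
    simp only [List.foldl_cons, ih, List.mem_cons]
    split_ifs with h
    · simp only [PySem.Set.mem_add]
      constructor
      · rintro (((hs | hj) | hj) | ⟨i, hi, hlt, hj⟩)
        · exact .inl hs
        · exact .inr ⟨a, .inl rfl, h, .inl hj⟩
        · exact .inr ⟨a, .inl rfl, h, .inr hj⟩
        · exact .inr ⟨i, .inr hi, hlt, hj⟩
      · rintro (hs | ⟨i, (rfl | hi), hlt, (hj | hj)⟩)
        · exact .inl (.inl (.inl hs))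
        · exact .inl (.inl (.inr hj))
        · exact .inl (.inr hj)
        · exact .inr ⟨i, hi, hlt, .inl hj⟩
        · exact .inr ⟨i, hi, hlt, .inr hj⟩
    · constructor
      · rintro (hs | ⟨i, hi, hlt, hj⟩)
        · exact .inl hs
        · exact .inr ⟨i, .inr hi, hlt, hj⟩
      · rintro (hs | ⟨i, (rfl | hi), hlt, hj⟩)
        · exact .inl hs
        · exact absurd hlt h
        · exact .inr ⟨i, hi, hlt, hj⟩

theorem pv_contains_eq (xs : List Int) (j : Int) :
    PySem.Set.contains
      ((PySem.List.pyRange 0 ((xs.length : Int) - 1) 1).foldl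
        (fun s i =>
          if PySem.List.pyGetD xs i 0 * PySem.List.pyGetD xs (i + 1) 0 < 0
          then PySem.Set.add (PySem.Set.add s i) (i + 1) else s)
        PySem.Set.empty) j = pvPb xs j := by
  apply Bool.eq_iff_iff.mpr
  rw [show (PySem.Set.contains
      ((PySem.List.pyRange 0 ((xs.length : Int) - 1) 1).foldl
        (fun s i =>
          if PySem.List.pyGetD xs i 0 * PySem.List.pyGetD xs (i + 1) 0 < 0
          then PySem.Set.add (PySem.Set.add s i) (i + 1) else s)
        PySem.Set.empty) j = true) ↔
      (j ∈ ((PySem.List.pyRange 0 ((xs.length : Int) - 1) 1).foldl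
        (fun s i =>
          if PySem.List.pyGetD xs i 0 * PySem.List.pyGetD xs (i + 1) 0 < 0
          then PySem.Set.add (PySem.Set.add s i) (i + 1) else s)
        PySem.Set.empty))
    from by simp [PySem.Set.contains]]
  rw [pv_mem_mark]
  simp only [PySem.Set.empty, List.not_mem_nil, false_or, PySem.List.mem_pyRange_one,
    pvPb, Bool.or_eq_true, Bool.and_eq_true, decide_eq_true_eq]
  constructor
  · rintro ⟨i, ⟨h0, h1⟩, hlt, rfl | rfl⟩
    · exact Or.inl ⟨⟨h0, h1⟩, hlt⟩
    · refine Or.inr ⟨⟨by omega, by omega⟩, ?_⟩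
      have : i + 1 - 1 = i := by ring
      rw [this]; exact hlt
  · rintro (⟨⟨h0, h1⟩, hlt⟩ | ⟨⟨h1, h2⟩, hlt⟩)
    · exact ⟨j, ⟨h0, h1⟩, hlt, Or.inl rfl⟩
    · refine ⟨j - 1, ⟨by omega, by omega⟩, ?_, Or.inr (by omega)⟩
      have : j - 1 + 1 = j := by ring
      rw [this]; exact hlt

theorem pv_alt_eq_pick (xs : List Int) : solution_alt xs = pvPick xs := by
  unfold solution_alt pvPick
  simp only [pv_contains_eq]

theorem pv_a_eq_pick (xs : List Int) : solution xs = pvPick xs := by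
  by_cases h : 1 < (xs.length : Int)
  · unfold solution pvPick
    rw [if_pos h]
    rw [PySem.List.pyRange_one_append 0 1 (xs.length : Int) (by omega) (by omega),
        PySem.List.pyRange_one_append 1 ((xs.length : Int) - 1) (xs.length : Int) (by omega) (by omega),
        show PySem.List.pyRange 0 1 1 = [0] from PySem.List.pyRange_one_singleton 0,
        show PySem.List.pyRange ((xs.length : Int) - 1) (xs.length : Int) 1
             = [(xs.length : Int) - 1] from by
          have hs := PySem.List.pyRange_one_singleton ((xs.length : Int) - 1)
          rw [show ((xs.length : Int) - 1) + 1 = (xs.length : Int) by ring] at hs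
          exact hs]
    rw [List.foldl_append, List.foldl_append]
    have h0 : pvPb xs 0 = checkValid (PySem.List.pyGetD xs 0 0) (PySem.List.pyGetD xs 1 0) := by
      simp only [pvPb, checkValid, zero_add]
      rw [decide_eq_true (by omega : (0:Int) ≤ 0),
          decide_eq_true (by omega : (0:Int) < (xs.length : Int) - 1),
          decide_eq_false (by omega : ¬ (1:Int) ≤ 0)]
      simp
    have hl : pvPb xs ((xs.length : Int) - 1)
        = checkValid (PySem.List.pyGetD xs ((xs.length : Int) - 1) 0)
                     (PySem.List.pyGetD xs ((xs.length : Int) - 2) 0) := by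
      simp only [pvPb, checkValid]
      rw [decide_eq_false (by omega : ¬ ((xs.length : Int) - 1 < (xs.length : Int) - 1)),
          decide_eq_true (by omega : (1:Int) ≤ (xs.length : Int) - 1),
          decide_eq_true (by omega : (xs.length : Int) - 1 < (xs.length : Int)),
          show (xs.length : Int) - 1 - 1 = (xs.length : Int) - 2 by ring,
          mul_comm (PySem.List.pyGetD xs ((xs.length : Int) - 2) 0)]
      simp
    have hmid : ∀ (acc : List Int), ∀ i ∈ PySem.List.pyRange 1 ((xs.length : Int) - 1) 1,
        (if pvPb xs i then acc ++ [PySem.List.pyGetD xs i 0] else acc)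
        = (if checkValid (PySem.List.pyGetD xs i 0) (PySem.List.pyGetD xs (i - 1) 0) ||
              checkValid (PySem.List.pyGetD xs i 0) (PySem.List.pyGetD xs (i + 1) 0)
           then acc ++ [PySem.List.pyGetD xs i 0] else acc) := by
      intro acc i hi
      rw [PySem.List.mem_pyRange_one] at hi
      have hpb : pvPb xs i
          = (checkValid (PySem.List.pyGetD xs i 0) (PySem.List.pyGetD xs (i - 1) 0) ||
             checkValid (PySem.List.pyGetD xs i 0) (PySem.List.pyGetD xs (i + 1) 0)) := by
        simp only [pvPb, checkValid]
        rw [decide_eq_true (by omega : (0:Int) ≤ i),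
            decide_eq_true hi.2, decide_eq_true hi.1,
            decide_eq_true (by omega : i < (xs.length : Int)),
            mul_comm (PySem.List.pyGetD xs (i - 1) 0)]
        simp [Bool.or_comm]
      rw [hpb]
    rw [PySem.List.foldl_congr_mem _ _ _ _ hmid]
    simp only [List.foldl_cons, List.foldl_nil, h0, hl]
  · rcases xs with _ | ⟨x, _ | ⟨y, t⟩⟩
    · rfl
    · unfold solution pvPick
      norm_num [pvPb, show PySem.List.pyRange 0 1 1 = [0] from by
        rw [show (1:Int) = 0 + 1 by ring]; exact PySem.List.pyRange_one_singleton 0]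
    · exfalso; apply h; simp

-- ===== VERDICT (by name: the statement is the Claim_ definition above) =====
theorem solution_spec : Claim_equal_solution := by
  intro xs _
  unfold Spec_solution
  rw [pv_a_eq_pick, pv_alt_eq_pick]
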